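-- pv_equiv track=rewrite | github.com/Tobywnkenobi/Week7-Day1-Mon | whiteboard.py | scramble
-- ===== SOURCE A (Python) =====
-- def scramble(str1, str2):
--     cnt_str1 = {}
--     cnt_str2 = {}
--     for char in str1:
--         cnt_str1[char] = cnt_str1.get(char, 0) + 1
--
--     for char in str2:
--         cnt_str2[char] = cnt_str2.get(char, 0) + 1
--
--     for char, count in cnt_str2.items():
--         if char not in cnt_str1 or cnt_str1[char] < count:
--             return False
--     return True
-- ===== SOURCE B (Python) =====
-- def scramble(str1, str2):
--     avail = {}
--     for ch in str1:
--         avail[ch] = avail.get(ch, 0) + 1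
--     for ch in str2:
--         n = avail.get(ch, 0)
--         if n <= 0:
--             return False
--         avail[ch] = n - 1
--     return True
-- ===== Notes on version B (the rewrite author's own statement) =====
-- stated objective: simpler
-- what changed: B builds a frequency table for str1 only and consumes it while scanning str2, returning False as soon as a character runs out, instead of building two full tables and comparing them afterwards.
import Mathlib
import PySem

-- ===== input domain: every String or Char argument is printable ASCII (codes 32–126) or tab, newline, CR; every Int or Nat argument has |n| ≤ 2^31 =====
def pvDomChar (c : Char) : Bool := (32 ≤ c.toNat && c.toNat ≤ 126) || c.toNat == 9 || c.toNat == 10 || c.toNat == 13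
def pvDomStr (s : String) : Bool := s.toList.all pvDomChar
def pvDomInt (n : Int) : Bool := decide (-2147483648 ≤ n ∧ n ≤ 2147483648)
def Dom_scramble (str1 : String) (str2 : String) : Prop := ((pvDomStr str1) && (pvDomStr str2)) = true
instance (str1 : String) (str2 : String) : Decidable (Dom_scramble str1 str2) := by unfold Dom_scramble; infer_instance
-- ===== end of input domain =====

-- B consumes a single frequency table of str1 while scanning str2 (early False), instead of A's two tables compared afterwards; same behaviour, simpler.

-- ===== PORT A =====
-- the final loop of A: iterate over cnt_str2.items() with early return False
def scrambleCheck (cnt1 : PySem.Dict Char Int) : List (Char × Int) → Bool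
  | [] => true
  | (ch, cnt) :: rest =>
    if ¬ cnt1.contains ch ∨ cnt1.getD ch 0 < cnt then false
    else scrambleCheck cnt1 rest

def scramble (str1 : String) (str2 : String) : Bool :=
  let cnt1 := str1.toList.foldl (fun d c => d.insert c (d.getD c 0 + 1)) PySem.Dict.empty
  let cnt2 := str2.toList.foldl (fun d c => d.insert c (d.getD c 0 + 1)) PySem.Dict.empty
  scrambleCheck cnt1 cnt2.items

-- ===== PORT B =====
-- B's second loop: decrement the running tally, early False when a char is exhausted
def scrambleConsume (avail : PySem.Dict Char Int) : List Char → Bool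
  | [] => true
  | ch :: rest =>
    let n := avail.getD ch 0
    if n ≤ 0 then false
    else scrambleConsume (avail.insert ch (n - 1)) rest

def scramble_alt (str1 : String) (str2 : String) : Bool :=
  let avail := str1.toList.foldl (fun d c => d.insert c (d.getD c 0 + 1)) PySem.Dict.empty
  scrambleConsume avail str2.toList

-- ===== PRECONDITION & SPEC =====
def Spec_scramble (str1 : String) (str2 : String) (out : Bool) : Prop := out = scramble_alt str1 str2
instance (str1 : String) (str2 : String) (out : Bool) : Decidable (Spec_scramble str1 str2 out) := by unfold Spec_scramble; infer_instance

-- ===== CLAIM (what is proved, stated in full; the proofs are below) =====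
def Claim_equal_scramble : Prop := ∀ (str1 : String) (str2 : String), Dom_scramble str1 str2 → Spec_scramble str1 str2 (scramble str1 str2)

-- ===== LEMMAS AND PROOFS =====

lemma scrambleCheck_eq_all (cnt1 : PySem.Dict Char Int) (ps : List (Char × Int)) :
    scrambleCheck cnt1 ps
      = ps.all (fun p => cnt1.contains p.1 && !decide (cnt1.getD p.1 0 < p.2)) := by
  induction ps with
  | nil => rfl
  | cons p rest ih =>
    obtain ⟨ch, cnt⟩ := p
    simp only [scrambleCheck, ih, List.all_cons]
    by_cases h : ¬ cnt1.contains ch ∨ cnt1.getD ch 0 < cnt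
    · simp only [if_pos h]
      rcases h with h | h <;> simp [h]
    · simp only [if_neg h]
      push Not at h
      simp [h.1, h.2]

lemma scrambleConsume_eq (avail : PySem.Dict Char Int) (l : List Char) :
    scrambleConsume avail l
      = decide (∀ c ∈ l, (l.count c : Int) ≤ avail.getD c 0) := by
  induction l generalizing avail with
  | nil => simp [scrambleConsume]
  | cons ch rest ih =>
    simp only [scrambleConsume]
    by_cases h : avail.getD ch 0 ≤ 0
    · simp only [if_pos h]
      have : ¬ (∀ c ∈ ch :: rest, ((ch :: rest).count c : Int) ≤ avail.getD c 0) := by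
        intro hall
        have := hall ch (List.mem_cons_self ..)
        have hc : 1 ≤ (ch :: rest).count ch := List.count_pos_iff.mpr (List.mem_cons_self ..)
        omega
      exact (decide_eq_false this).symm
    · simp only [if_neg h]
      push Not at h
      rw [ih]
      apply (decide_eq_decide).mpr
      constructor
      · intro hall c hc
        rcases List.mem_cons.mp hc with hce | hcr
        · subst hce
          rw [List.count_cons_self]
          by_cases hmem : c ∈ rest
          · have := hall c hmem
            rw [PySem.Dict.getD_insert, if_pos rfl] at this
            push_cast at this ⊢
            omega
          · rw [List.count_eq_zero_of_not_mem hmem]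
            push_cast
            omega
        · have := hall c hcr
          by_cases hce : c = ch
          · subst hce
            rw [List.count_cons_self]
            rw [PySem.Dict.getD_insert, if_pos rfl] at this
            push_cast at this ⊢
            omega
          · rw [List.count_cons_of_ne (Ne.symm hce)]
            rw [PySem.Dict.getD_insert, if_neg hce] at this
            exact this
      · intro hall c hc
        have hcc : c ∈ ch :: rest := List.mem_cons_of_mem _ hc
        have := hall c hcc
        rw [PySem.Dict.getD_insert]
        by_cases hce : c = ch
        · subst hce
          rw [if_pos rfl]
          have h2 := hall c (List.mem_cons_self ..)
          rw [List.count_cons_self] at h2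
          push_cast at h2 ⊢
          omega
        · rw [if_neg hce]
          rw [List.count_cons_of_ne (Ne.symm hce)] at this
          exact this

lemma scramble_eq_spec (str1 str2 : String) :
    scramble str1 str2
      = decide (∀ c ∈ str2.toList, (str2.toList.count c : Int) ≤ (str1.toList.count c : Int)) := by
  unfold scramble
  rw [PySem.Dict.foldl_insert_getD_add_one_eq_counter,
      PySem.Dict.foldl_insert_getD_add_one_eq_counter,
      scrambleCheck_eq_all, PySem.Dict.items_counter, List.all_map]
  rcases Bool.eq_false_or_eq_true
      (decide (∀ c ∈ str2.toList, (str2.toList.count c : Int) ≤ (str1.toList.count c : Int))) with hd | hd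
  · rw [hd]
    rw [decide_eq_true_eq] at hd

    apply List.all_eq_true.mpr
    intro c hc
    have hc2 : c ∈ str2.toList := (PySem.Set.mem_ofList _ _).mp hc
    have hle := hd c hc2
    have hpos : 1 ≤ str2.toList.count c := List.count_pos_iff.mpr hc2
    have hmem1 : c ∈ str1.toList := by
      apply List.count_pos_iff.mp
      omega
    simp only [Function.comp, PySem.Dict.getD_counter, PySem.Dict.contains_counter,
      Bool.and_eq_true, Bool.not_eq_true', decide_eq_false_iff_not, not_lt]
    constructor
    · simp [hmem1]
    · exact hle
  · rw [hd]
    rw [decide_eq_false_iff_not] at hd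
    push Not at hd
    obtain ⟨c, hc, hlt⟩ := hd
    apply List.all_eq_false.mpr
    refine ⟨c, (PySem.Set.mem_ofList _ _).mpr hc, ?_⟩
    simp [Function.comp, PySem.Dict.getD_counter, hlt]

lemma scramble_alt_eq_spec (str1 str2 : String) :
    scramble_alt str1 str2
      = decide (∀ c ∈ str2.toList, (str2.toList.count c : Int) ≤ (str1.toList.count c : Int)) := by
  unfold scramble_alt
  rw [PySem.Dict.foldl_insert_getD_add_one_eq_counter, scrambleConsume_eq]
  apply (decide_eq_decide).mpr
  constructor
  · intro h c hc; have := h c hc; rwa [PySem.Dict.getD_counter] at this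
  · intro h c hc; rw [PySem.Dict.getD_counter]; exact h c hc

-- ===== VERDICT (by name: the statement is the Claim_ definition above) =====
theorem scramble_spec : Claim_equal_scramble := by
  intro str1 str2 _
  unfold Spec_scramble
  rw [scramble_eq_spec, scramble_alt_eq_spec]
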